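-- pv_equiv track=rewrite | github.com/minkyu-shim/ai-code-repair | experiments/case_004/20260305T201051Z/workspace/buggy.py | most_frequent_run
-- ===== SOURCE A (Python) =====
-- def encode(s: str) -> list[tuple[str, int]]:
--     """Run-length encode a string.
--
--     Groups consecutive identical characters and returns a list of
--     (character, count) tuples.
--
--     Example: "aaabbc" -> [("a", 3), ("b", 2), ("c", 1)]
--     """
--     if not s:
--         return []
--
--     result: list[tuple[str, int]] = []
--     current = s[0]
--     count = 1
--
--     for i in range(1, len(s)):
--         if s[i] == current:
--             count += 1
--         else:
--             result.append((current, count))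
--             current = s[i]
--             count = 1  # Fix: Reset count to 1 for the new character
--
--     # Append the last run
--     result.append((current, count))
--     return result
--
-- def most_frequent_run(s: str) -> tuple[str, int]:
--     """Return the (char, count) tuple with the highest count.
--
--     On a tie, returns the run that appears first in the string.
--     Returns ("", 0) for an empty string.
--     """
--     if not s:
--         return ("", 0)
--
--     encoded = encode(s)
--     best_char = encoded[0][0]
--     best_count = encoded[0][1]
--
--     for char, count in encoded[1:]:
--         # Fix: Only update if current count is strictly greater to prefer earlier runs on a tie.
--         if count > best_count:
--             best_char = char
--             best_count = count
--
--     return (best_char, best_count)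
-- ===== SOURCE B (Python) =====
-- def most_frequent_run(s: str) -> tuple[str, int]:
--     """Single fused pass: track the current run and the best run so far;
--     no intermediate run-length list."""
--     if not s:
--         return ("", 0)
--     cur = s[0]
--     cnt = 1
--     best_char, best_count = s[0], 1
--     for ch in s[1:]:
--         if ch == cur:
--             cnt += 1
--         else:
--             if cnt > best_count:
--                 best_char, best_count = cur, cnt
--             cur, cnt = ch, 1
--     if cnt > best_count:
--         best_char, best_count = cur, cnt
--     return (best_char, best_count)
-- ===== Notes on version B (the rewrite author's own statement) =====
-- stated objective: faster
-- what changed: B replaces A's two-phase run-length-encode-then-scan (building an intermediate list of (char,count) tuples, then scanning it) with one fused pass over the string tracking the current run and the best run directly, allocating no intermediate list.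
import Mathlib
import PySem

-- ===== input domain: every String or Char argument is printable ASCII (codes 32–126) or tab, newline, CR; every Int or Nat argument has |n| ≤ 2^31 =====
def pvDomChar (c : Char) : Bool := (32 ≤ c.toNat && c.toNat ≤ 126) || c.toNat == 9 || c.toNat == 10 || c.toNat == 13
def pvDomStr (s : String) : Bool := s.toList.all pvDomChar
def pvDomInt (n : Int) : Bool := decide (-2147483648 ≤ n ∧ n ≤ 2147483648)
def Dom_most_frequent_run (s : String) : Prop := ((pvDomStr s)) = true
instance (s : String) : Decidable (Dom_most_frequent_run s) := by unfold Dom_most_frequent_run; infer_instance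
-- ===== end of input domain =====

set_option maxRecDepth 4000


-- B is a single fused pass (no intermediate run-length list); return value proved equal to A's.

-- ===== PORT A =====
-- encode's loop: carries (current, count) and the accumulated result list
def encodeAux : List Char → Char → Int → List (Char × Int) → List (Char × Int)
  | [], cur, cnt, acc => acc ++ [(cur, cnt)]
  | c :: rest, cur, cnt, acc =>
      if c == cur then encodeAux rest cur (cnt + 1) acc
      else encodeAux rest c 1 (acc ++ [(cur, cnt)])

def encode (s : String) : List (Char × Int) :=
  match s.toList with
  | [] => []
  | c :: rest => encodeAux rest c 1 []

-- the scan over encoded[1:] with best_char / best_count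
def scanBest : List (Char × Int) → Char → Int → Char × Int
  | [], bc, bcnt => (bc, bcnt)
  | (c, k) :: rest, bc, bcnt =>
      if k > bcnt then scanBest rest c k else scanBest rest bc bcnt

def most_frequent_run (s : String) : String × Int :=
  match s.toList with
  | [] => ("", 0)
  | _ :: _ =>
    match encode s with
    | [] => ("", 0)   -- unreachable: encode of a nonempty string is nonempty
    | (c, k) :: rest =>
      let (bc, bcnt) := scanBest rest c k
      (String.mk [bc], bcnt)

-- ===== PORT B =====
-- the fused loop: current run (cur, cnt) and best run (bc, bcnt)
def fusedAux : List Char → Char → Int → Char → Int → Char × Int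
  | [], cur, cnt, bc, bcnt => if cnt > bcnt then (cur, cnt) else (bc, bcnt)
  | c :: rest, cur, cnt, bc, bcnt =>
      if c == cur then fusedAux rest cur (cnt + 1) bc bcnt
      else if cnt > bcnt then fusedAux rest c 1 cur cnt
      else fusedAux rest c 1 bc bcnt

def most_frequent_run_alt (s : String) : String × Int :=
  match s.toList with
  | [] => ("", 0)
  | c :: rest =>
    let (bc, bcnt) := fusedAux rest c 1 c 1
    (String.mk [bc], bcnt)

-- ===== PRECONDITION & SPEC =====
def Spec_most_frequent_run (s : String) (out : String × Int) : Prop := out = most_frequent_run_alt s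
instance (s : String) (out : String × Int) : Decidable (Spec_most_frequent_run s out) := by unfold Spec_most_frequent_run; infer_instance

-- ===== CLAIM (what is proved, stated in full; the proofs are below) =====
def Claim_equal_most_frequent_run : Prop := ∀ (s : String), Dom_most_frequent_run s → Spec_most_frequent_run s (most_frequent_run s)

-- ===== LEMMAS AND PROOFS =====

lemma encodeAux_acc (l : List Char) : ∀ (cur : Char) (cnt : Int) (acc : List (Char × Int)),
    encodeAux l cur cnt acc = acc ++ encodeAux l cur cnt [] := by
  induction l with
  | nil =>
    intro cur cnt acc
    show acc ++ [(cur, cnt)] = acc ++ ([] ++ [(cur, cnt)])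
    rw [List.nil_append]
  | cons c rest ih =>
    intro cur cnt acc
    by_cases h : c == cur
    · simp only [encodeAux, h, if_true]
      exact ih cur (cnt + 1) acc
    · simp only [encodeAux, h, Bool.false_eq_true, if_false]
      rw [ih c 1 (acc ++ [(cur, cnt)]), ih c 1 ([] ++ [(cur, cnt)])]
      simp

lemma encodeAux_ne_nil (l : List Char) : ∀ (cur : Char) (cnt : Int),
    encodeAux l cur cnt [] ≠ [] := by
  induction l with
  | nil => intro cur cnt; simp [encodeAux]
  | cons c rest ih =>
    intro cur cnt
    by_cases h : c == cur
    · simpa [encodeAux, h] using ih cur (cnt + 1)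
    · simp only [encodeAux, h, Bool.false_eq_true, if_false]
      rw [encodeAux_acc]; simp

lemma scanBest_encodeAux (l : List Char) : ∀ (cur : Char) (cnt : Int) (bc : Char) (bcnt : Int),
    scanBest (encodeAux l cur cnt []) bc bcnt = fusedAux l cur cnt bc bcnt := by
  induction l with
  | nil => intro cur cnt bc bcnt; simp [encodeAux, scanBest, fusedAux]
  | cons c rest ih =>
    intro cur cnt bc bcnt
    by_cases h : c == cur
    · simp [encodeAux, fusedAux, h, ih]
    · simp only [encodeAux, fusedAux, h, Bool.false_eq_true, if_false]
      rw [encodeAux_acc, List.nil_append, List.singleton_append]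
      simp only [scanBest]
      by_cases hgt : cnt > bcnt <;> simp [hgt, ih]

-- when the best-so-far char is the current char, any best count ≤ cnt yields the same result
lemma fusedAux_best_le (l : List Char) : ∀ (cur : Char) (cnt b : Int), b ≤ cnt →
    fusedAux l cur cnt cur b = fusedAux l cur cnt cur cnt := by
  induction l with
  | nil =>
    intro cur cnt b hb
    simp only [fusedAux, lt_self_iff_false, if_false, gt_iff_lt]
    by_cases h : b < cnt
    · simp [h]
    · have : b = cnt := le_antisymm hb (not_lt.mp h)
      simp [this]
  | cons c rest ih =>
    intro cur cnt b hb
    by_cases h : c == cur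
    · simp only [fusedAux, h, if_true]
      rw [ih cur (cnt + 1) b (by omega), ih cur (cnt + 1) cnt (by omega)]
    · simp only [fusedAux, h, Bool.false_eq_true, if_false, gt_iff_lt, lt_self_iff_false]
      by_cases hgt : b < cnt
      · simp [hgt]
      · have : b = cnt := le_antisymm hb (not_lt.mp hgt)
        simp [this]

lemma head_encodeAux (l : List Char) : ∀ (cur : Char) (cnt : Int),
    (match encodeAux l cur cnt [] with
     | [] => (default : Char × Int)
     | (c, k) :: rest => scanBest rest c k) = fusedAux l cur cnt cur cnt := by
  induction l with
  | nil => intro cur cnt; simp [encodeAux, scanBest, fusedAux]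
  | cons c rest ih =>
    intro cur cnt
    by_cases h : c == cur
    · simp only [encodeAux, fusedAux, h, if_true]
      rw [fusedAux_best_le rest cur (cnt + 1) cnt (by omega)]
      exact ih cur (cnt + 1)
    · simp only [encodeAux, fusedAux, h, Bool.false_eq_true, if_false, gt_iff_lt, lt_self_iff_false]
      rw [encodeAux_acc, List.nil_append, List.singleton_append]
      exact scanBest_encodeAux rest c 1 cur cnt

-- ===== VERDICT (by name: the statement is the Claim_ definition above) =====
theorem most_frequent_run_spec : Claim_equal_most_frequent_run := by
  intro s _
  unfold Spec_most_frequent_run most_frequent_run most_frequent_run_alt encode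
  cases hl : s.toList with
  | nil => rfl
  | cons c rest =>
    have key := head_encodeAux rest c 1
    cases he : encodeAux rest c 1 [] with
    | nil => exact absurd he (encodeAux_ne_nil rest c 1)
    | cons hd tl =>
      obtain ⟨hc, hk⟩ := hd
      rw [he] at key
      simp only at key
      simp only [he, key]
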